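-- pv_equiv track=rewrite | github.com/JakeC77/Artax | knowledge/ai-agents/core/run_log_reader.py | get_recent_messages
-- ===== SOURCE A (Python) =====
-- from typing import Any, Optional
--
-- def get_recent_messages(
--     messages: list[dict[str, str]],
--     max_messages: int = 30,
--     max_tokens: Optional[int] = 80000,
-- ) -> list[dict[str, str]]:
--     """Return a sliding window of the most recent messages, optionally capped by token estimate.
--
--     Args:
--         messages: Full list of {role, content} from get_run_log_messages.
--         max_messages: Maximum number of messages to return (count of user + assistant turns).
--         max_tokens: Optional cap; estimated as ~4 chars per token. Trim from front until under.
--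
--     Returns:
--         Sublist of messages (most recent) suitable for agent context.
--     """
--     if not messages:
--         return []
--     window = messages[-max_messages:] if len(messages) > max_messages else messages
--     if max_tokens is None or max_tokens <= 0:
--         return window
--     total_chars = sum(len(m.get("content", "")) for m in window)
--     estimated_tokens = total_chars // 4
--     while estimated_tokens > max_tokens and len(window) > 1:
--         window = window[1:]
--         total_chars = sum(len(m.get("content", "")) for m in window)
--         estimated_tokens = total_chars // 4
--     return window
-- ===== SOURCE B (Python) =====
-- def get_recent_messages(messages, max_messages=30, max_tokens=80000):
--     if not messages:
--         return []
--     window = messages[-max_messages:] if len(messages) > max_messages else messages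
--     if max_tokens is None or max_tokens <= 0:
--         return window
--     # Back-to-front pass: count how many trailing messages fit the
--     # token estimate with a running char total (at least one), then slice once.
--     chars = 0
--     count = 0
--     for m in reversed(window):
--         c = chars + len(m.get("content", ""))
--         if c // 4 > max_tokens:
--             break
--         chars = c
--         count += 1
--     if count == 0:
--         count = 1
--     return window[len(window) - count:]
-- ===== Notes on version B (the rewrite author's own statement) =====
-- stated objective: alternative
-- what changed: Replaces A's front-dropping while-loop that re-sums all remaining content lengths after every drop with a single back-to-front counting pass keeping a running char total, followed by one slice.
import Mathlib
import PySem

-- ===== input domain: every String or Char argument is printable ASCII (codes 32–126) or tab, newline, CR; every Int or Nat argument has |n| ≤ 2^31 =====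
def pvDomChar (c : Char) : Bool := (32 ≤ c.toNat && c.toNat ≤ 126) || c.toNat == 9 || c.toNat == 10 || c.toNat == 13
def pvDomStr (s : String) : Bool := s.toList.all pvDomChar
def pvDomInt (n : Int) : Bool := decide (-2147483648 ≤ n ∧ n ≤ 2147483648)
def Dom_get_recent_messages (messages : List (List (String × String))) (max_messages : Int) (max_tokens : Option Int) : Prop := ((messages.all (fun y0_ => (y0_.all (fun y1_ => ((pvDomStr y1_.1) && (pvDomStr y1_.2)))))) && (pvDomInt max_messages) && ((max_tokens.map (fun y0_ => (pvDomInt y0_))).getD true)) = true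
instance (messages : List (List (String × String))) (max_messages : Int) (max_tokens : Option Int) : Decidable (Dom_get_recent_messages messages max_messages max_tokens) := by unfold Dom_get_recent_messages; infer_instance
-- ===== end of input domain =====

-- B replaces A's front-dropping while-loop that re-sums the window after every
-- drop with a single back-to-front counting pass and one slice (alternative
-- decomposition; same measured cost, since the window is capped by max_messages).

-- ===== PORT A =====
-- len(m.get("content", "")) — shared primitive of both Pythons
def pvContentLen (m : List (String × String)) : Int :=
  PySem.Str.len (PySem.Dict.getD (PySem.Dict.mk m) "content" "")

-- sum(len(m.get("content", "")) for m in window)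
def pvTotalChars (w : List (List (String × String))) : Int :=
  (w.map pvContentLen).sum

-- the while-loop: re-sum the whole window, drop the front while over budget
def pvALoop (mt : Int) : List (List (String × String)) → List (List (String × String))
  | [] => []
  | m :: rest =>
    if PySem.Int.floordiv (pvTotalChars (m :: rest)) 4 > mt ∧ 1 < (m :: rest).length then
      pvALoop mt rest
    else m :: rest

def get_recent_messages (messages : List (List (String × String))) (max_messages : Int) (max_tokens : Option Int) : List (List (String × String)) :=
  if messages = [] then []
  else
    let window :=
      if (messages.length : Int) > max_messages then
        PySem.List.slice messages (some (-max_messages)) none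
      else messages
    match max_tokens with
    | none => window
    | some mt => if mt ≤ 0 then window else pvALoop mt window

-- ===== PORT B =====
-- the back-to-front pass of Source B: running char total, count of fitting messages
def pvBCount (mt : Int) : List (List (String × String)) → Int → Int → Int
  | [], _, count => count
  | m :: rs, chars, count =>
    let c := chars + pvContentLen m
    if PySem.Int.floordiv c 4 > mt then count
    else pvBCount mt rs c (count + 1)

def get_recent_messages_alt (messages : List (List (String × String))) (max_messages : Int) (max_tokens : Option Int) : List (List (String × String)) :=
  if messages = [] then []
  else
    let window :=
      if (messages.length : Int) > max_messages then
        PySem.List.slice messages (some (-max_messages)) none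
      else messages
    match max_tokens with
    | none => window
    | some mt =>
      if mt ≤ 0 then window
      else
        let count := pvBCount mt window.reverse 0 0
        let count := if count = 0 then 1 else count
        PySem.List.slice window (some ((window.length : Int) - count)) none

-- ===== PRECONDITION & SPEC =====
def Spec_get_recent_messages (messages : List (List (String × String))) (max_messages : Int) (max_tokens : Option Int) (out : List (List (String × String))) : Prop := out = get_recent_messages_alt messages max_messages max_tokens
instance (messages : List (List (String × String))) (max_messages : Int) (max_tokens : Option Int) (out : List (List (String × String))) : Decidable (Spec_get_recent_messages messages max_messages max_tokens out) := by unfold Spec_get_recent_messages; infer_instance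

-- ===== CLAIM (what is proved, stated in full; the proofs are below) =====
def Claim_equal_get_recent_messages : Prop := ∀ (messages : List (List (String × String))) (max_messages : Int) (max_tokens : Option Int), Dom_get_recent_messages messages max_messages max_tokens → Spec_get_recent_messages messages max_messages max_tokens (get_recent_messages messages max_messages max_tokens)

-- ===== LEMMAS AND PROOFS =====

-- Nat-valued ghost of pvBCount's consumed count
def pvCnt (mt : Int) : List (List (String × String)) → Int → Nat
  | [], _ => 0
  | m :: rs, chars =>
    let c := chars + pvContentLen m
    if PySem.Int.floordiv c 4 > mt then 0 else pvCnt mt rs c + 1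

theorem pvBCount_eq (mt : Int) (xs : List (List (String × String))) (chars count : Int) :
    pvBCount mt xs chars count = count + (pvCnt mt xs chars : Int) := by
  induction xs generalizing chars count with
  | nil => simp [pvBCount, pvCnt]
  | cons m rs ih =>
    simp only [pvBCount, pvCnt]
    split
    · simp
    · rw [ih]; push_cast; ring

theorem pvCnt_le (mt : Int) (xs : List (List (String × String))) (chars : Int) :
    pvCnt mt xs chars ≤ xs.length := by
  induction xs generalizing chars with
  | nil => simp [pvCnt]
  | cons m rs ih =>
    simp only [pvCnt, List.length_cons]
    split
    · omega
    · have := ih (chars + pvContentLen m); omega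

theorem pvContentLen_nonneg (m : List (String × String)) : 0 ≤ pvContentLen m := by
  simp [pvContentLen, PySem.Str.len_eq]

theorem pvTotalChars_nonneg (w : List (List (String × String))) : 0 ≤ pvTotalChars w := by
  apply List.sum_nonneg
  intro x hx
  obtain ⟨m, _, rfl⟩ := List.mem_map.mp hx
  exact pvContentLen_nonneg m

theorem pvFdMono {a b : Int} (h : a ≤ b) :
    PySem.Int.floordiv a 4 ≤ PySem.Int.floordiv b 4 := by
  rw [PySem.Int.floordiv_eq_ediv_of_pos (by norm_num),
      PySem.Int.floordiv_eq_ediv_of_pos (by norm_num)]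
  exact Int.ediv_le_ediv (by norm_num) h

-- if the whole remaining sum fits, the pass consumes everything
theorem pvCnt_full (mt : Int) (xs : List (List (String × String))) (chars : Int)
    (h : PySem.Int.floordiv (chars + pvTotalChars xs) 4 ≤ mt) :
    pvCnt mt xs chars = xs.length := by
  induction xs generalizing chars with
  | nil => simp [pvCnt]
  | cons m rs ih =>
    have hrs : 0 ≤ pvTotalChars rs := pvTotalChars_nonneg rs
    have hsum : pvTotalChars (m :: rs) = pvContentLen m + pvTotalChars rs := by
      simp [pvTotalChars]
    have hb : chars + pvContentLen m ≤ chars + pvTotalChars (m :: rs) := by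
      rw [hsum]; omega
    have h1 : PySem.Int.floordiv (chars + pvContentLen m) 4 ≤ mt :=
      le_trans (pvFdMono hb) h
    have h2 : PySem.Int.floordiv (chars + pvContentLen m + pvTotalChars rs) 4 ≤ mt := by
      have harg : chars + pvContentLen m + pvTotalChars rs = chars + pvTotalChars (m :: rs) := by
        rw [hsum]; ring
      rw [harg]; exact h
    simp only [pvCnt, List.length_cons]
    rw [if_neg (not_lt.mpr h1), ih _ h2]

theorem pvCnt_snoc (mt : Int) (xs : List (List (String × String))) (m : List (String × String)) (chars : Int) :
    pvCnt mt (xs ++ [m]) chars =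
      pvCnt mt xs chars +
        (if pvCnt mt xs chars = xs.length ∧
            PySem.Int.floordiv (chars + pvTotalChars xs + pvContentLen m) 4 ≤ mt
         then 1 else 0) := by
  induction xs generalizing chars with
  | nil =>
    simp only [List.nil_append, pvCnt, pvTotalChars, List.map_nil, List.sum_nil, add_zero,
      List.length_nil, true_and, zero_add]
    by_cases h : PySem.Int.floordiv (chars + pvContentLen m) 4 > mt
    · rw [if_pos h, if_neg (not_le.mpr h)]
    · rw [if_neg h, if_pos (not_lt.mp h)]
  | cons x rs ih =>
    have hsum : pvTotalChars (x :: rs) = pvContentLen x + pvTotalChars rs := by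
      simp [pvTotalChars]
    have harg : chars + pvTotalChars (x :: rs) + pvContentLen m
        = chars + pvContentLen x + pvTotalChars rs + pvContentLen m := by
      rw [hsum]; ring
    simp only [List.cons_append, pvCnt, List.length_cons]
    by_cases h : PySem.Int.floordiv (chars + pvContentLen x) 4 > mt
    · simp only [if_pos h]
      rw [if_neg (by intro hc; omega), add_zero]
    · simp only [if_neg h]
      rw [ih, harg]
      by_cases hk : pvCnt mt rs (chars + pvContentLen x) = rs.length
      · by_cases hC : PySem.Int.floordiv (chars + pvContentLen x + pvTotalChars rs + pvContentLen m) 4 ≤ mt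
        · rw [if_pos ⟨hk, hC⟩, if_pos ⟨by omega, hC⟩]
        · rw [if_neg (by tauto), if_neg (by tauto)]
      · rw [if_neg (by tauto), if_neg (by intro hc; exact hk (by omega))]

-- the final window length of B's computation
def pvN (mt : Int) (w : List (List (String × String))) : Nat :=
  if pvCnt mt w.reverse 0 = 0 then 1 else pvCnt mt w.reverse 0

theorem pvTotalChars_reverse (w : List (List (String × String))) :
    pvTotalChars w.reverse = pvTotalChars w := by
  simp [pvTotalChars, List.map_reverse]

theorem pvN_le (mt : Int) (w : List (List (String × String))) (hw : w ≠ []) :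
    1 ≤ pvN mt w ∧ pvN mt w ≤ w.length := by
  have h := pvCnt_le mt w.reverse 0
  rw [List.length_reverse] at h
  have hlen : 1 ≤ w.length := List.length_pos_iff.mpr hw
  unfold pvN
  split <;> omega

-- A's while-loop computes exactly the suffix of length pvN
theorem pvALoop_eq_drop (mt : Int) (w : List (List (String × String))) :
    pvALoop mt w = w.drop (w.length - pvN mt w) := by
  induction w with
  | nil => simp [pvALoop]
  | cons m rest ih =>
    by_cases hcond : PySem.Int.floordiv (pvTotalChars (m :: rest)) 4 > mt ∧
        1 < (m :: rest).length
    · -- loop iterates: drop the head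
      have hrest : rest ≠ [] := by
        intro h; subst h; exact absurd hcond.2 (by simp)
      have hsnoc := pvCnt_snoc mt rest.reverse m 0
      have hrev : (m :: rest).reverse = rest.reverse ++ [m] := by simp
      have hfail : ¬ PySem.Int.floordiv (0 + pvTotalChars rest.reverse + pvContentLen m) 4 ≤ mt := by
        rw [pvTotalChars_reverse]
        have : (0 : Int) + pvTotalChars rest + pvContentLen m = pvTotalChars (m :: rest) := by
          simp [pvTotalChars]; ring
        rw [this]
        exact not_le.mpr hcond.1
      have hcnt : pvCnt mt (m :: rest).reverse 0 = pvCnt mt rest.reverse 0 := by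
        rw [hrev, hsnoc, if_neg (fun h => hfail h.2)]; omega
      have hN : pvN mt (m :: rest) = pvN mt rest := by
        unfold pvN; rw [hcnt]
      have hNle := pvN_le mt rest hrest
      rw [pvALoop, if_pos hcond, ih, hN]
      have : (m :: rest).length - pvN mt rest = (rest.length - pvN mt rest) + 1 := by
        simp only [List.length_cons]; omega
      rw [this, List.drop_succ_cons]
    · -- loop exits: the window stays
      rw [pvALoop, if_neg hcond]
      rcases not_and_or.mp hcond with h | h
      · -- the whole window fits the budget
        have hfit : PySem.Int.floordiv (0 + pvTotalChars (m :: rest).reverse) 4 ≤ mt := by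
          rw [pvTotalChars_reverse, zero_add]
          exact not_lt.mp h
        have hcnt := pvCnt_full mt (m :: rest).reverse 0 hfit
        rw [List.length_reverse] at hcnt
        have : pvN mt (m :: rest) = (m :: rest).length := by
          unfold pvN; rw [hcnt]; simp
        rw [this]; simp
      · -- singleton window
        have hrest : rest = [] := by
          simp only [List.length_cons, not_lt] at h
          exact List.length_eq_zero_iff.mp (by omega)
        subst hrest
        have := pvN_le mt [m] (by simp)
        have : pvN mt [m] = 1 := by omega
        rw [this]; simp

-- B's slice is that same drop
theorem pvSlice_eq_drop (mt : Int) (w : List (List (String × String))) :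
    PySem.List.slice w
        (some ((w.length : Int) -
          (if pvBCount mt w.reverse 0 0 = 0 then 1 else pvBCount mt w.reverse 0 0)))
        none
      = w.drop (w.length - pvN mt w) := by
  rw [pvBCount_eq, zero_add]
  rcases eq_or_ne w [] with rfl | hw
  · rcases eq_or_ne (pvCnt mt ([] : List (List (String × String))).reverse 0) 0 with h | h
    · simp [PySem.List.slice_some_none]
    · simp [pvCnt, List.reverse_nil] at h
  · have hN := pvN_le mt w hw
    have hcast : (if (pvCnt mt w.reverse 0 : Int) = 0 then 1 else (pvCnt mt w.reverse 0 : Int))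
        = (pvN mt w : Int) := by
      unfold pvN
      split <;> split <;> simp_all
    rw [hcast]
    have hnn : (0 : Int) ≤ (w.length : Int) - (pvN mt w : Int) := by
      have := hN.2; omega
    rw [PySem.List.slice_from w hnn]
    congr 1
    omega

-- ===== VERDICT (by name: the statement is the Claim_ definition above) =====
theorem get_recent_messages_spec : Claim_equal_get_recent_messages := by
  intro messages max_messages max_tokens _
  unfold Spec_get_recent_messages get_recent_messages get_recent_messages_alt
  rcases eq_or_ne messages [] with rfl | hne
  · simp
  · rw [if_neg hne, if_neg hne]
    cases max_tokens with
    | none => rfl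
    | some mt =>
      simp only
      by_cases hmt : mt ≤ 0
      · rw [if_pos hmt, if_pos hmt]
      · rw [if_neg hmt, if_neg hmt]
        rw [pvALoop_eq_drop, pvSlice_eq_drop]
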